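-- pv_equiv track=rewrite | github.com/WazedKhan/Problems | Google Kick Start/FooBar/EnRouteSalute.py | solution
-- ===== SOURCE A (Python) =====
-- def solution(s):
--     comes = goes = 0
--     for index, emp in enumerate(s):
--         right = left = 0
--         if emp == '>':
--             for i in s[index:]:
--                 if i == '<':
--                     right += 1
--
--         if emp == '<':
--             for i in s[:index]:
--                 if i == '>':
--                     left += 1
--
--         comes += right
--         goes += left
--     return comes + goes
-- ===== SOURCE B (Python) =====
-- def solution(s):
--     # single pass: each '<' meets every '>' already seen; each meeting = 2 salutes
--     gt = 0
--     total = 0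
--     for c in s:
--         if c == '>':
--             gt += 1
--         elif c == '<':
--             total += 2 * gt
--     return total
-- ===== Notes on version B (the rewrite author's own statement) =====
-- stated objective: faster
-- what changed: Replaced A's per-character rescans of the suffix/prefix with a single left-to-right pass that keeps a running count of '>' and adds twice that count at each '<'.
import Mathlib
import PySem

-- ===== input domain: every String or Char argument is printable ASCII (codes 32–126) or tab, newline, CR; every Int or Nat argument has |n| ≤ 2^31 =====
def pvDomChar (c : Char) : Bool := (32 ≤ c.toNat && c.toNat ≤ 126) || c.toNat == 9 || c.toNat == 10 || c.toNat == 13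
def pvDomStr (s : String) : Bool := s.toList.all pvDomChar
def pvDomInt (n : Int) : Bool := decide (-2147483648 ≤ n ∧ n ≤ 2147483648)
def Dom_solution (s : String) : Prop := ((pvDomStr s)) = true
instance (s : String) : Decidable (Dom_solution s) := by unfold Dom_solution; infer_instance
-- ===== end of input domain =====

-- B replaces A's quadratic rescans (for each '>' count the '<' after it, for each '<' count the '>' before it)
-- by one pass that keeps a running count of '>' and adds 2*count at each '<'.


-- ===== PORT A =====
-- literal transliteration of A: fold over enumerate(s); at '>' rescan the suffix s[index:]
-- counting '<'; at '<' rescan the prefix s[:index] counting '>'; return comes + goes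
def solution (s : String) : Int :=
  let cs := s.toList
  let st := (PySem.List.enumerate cs 0).foldl
    (fun (cg : Int × Int) (p : Int × Char) =>
      let right : Int :=
        if p.2 = '>' then
          (PySem.List.slice cs (some p.1) none).foldl
            (fun r i => if i = '<' then r + 1 else r) 0
        else 0
      let left : Int :=
        if p.2 = '<' then
          (PySem.List.slice cs none (some p.1)).foldl
            (fun l i => if i = '>' then l + 1 else l) 0
        else 0
      (cg.1 + right, cg.2 + left))
    ((0 : Int), (0 : Int))
  st.1 + st.2

-- ===== PORT B =====
-- literal transliteration of B: one pass with state (gt, total); '>' bumps gt, '<' adds 2*gt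
def solution_alt (s : String) : Int :=
  (s.toList.foldl
    (fun (st : Int × Int) c =>
      if c = '>' then (st.1 + 1, st.2)
      else if c = '<' then (st.1, st.2 + 2 * st.1)
      else st)
    ((0 : Int), (0 : Int))).2

-- ===== PRECONDITION & SPEC =====
def Spec_solution (s : String) (out : Int) : Prop := out = solution_alt s
instance (s : String) (out : Int) : Decidable (Spec_solution s out) := by unfold Spec_solution; infer_instance

-- ===== CLAIM (what is proved, stated in full; the proofs are below) =====
def Claim_equal_solution : Prop := ∀ (s : String), Dom_solution s → Spec_solution s (solution s)

-- ===== LEMMAS AND PROOFS =====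

-- number of '<' (resp. '>') in a list, as an Int
def ltI (l : List Char) : Int := (l.countP (fun c => c == '<') : Int)
def gtI (l : List Char) : Int := (l.countP (fun c => c == '>') : Int)

-- A's "comes" sum, recursively: at each '>' count the '<' strictly after it
def pairsF : List Char → Int
  | [] => 0
  | c :: cs => (if c = '>' then ltI cs else 0) + pairsF cs

-- A's "goes" sum / B's accumulation, recursively: g = '>' seen so far
def goesF : Int → List Char → Int
  | _, [] => 0
  | g, c :: cs => (if c = '<' then g else 0) + goesF (g + (if c = '>' then 1 else 0)) cs

theorem ltI_cons (c : Char) (cs : List Char) :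
    ltI (c :: cs) = (if c = '<' then 1 else 0) + ltI cs := by
  simp only [ltI, List.countP_cons]
  by_cases h : c = '<' <;> simp [h] <;> try omega

theorem gtI_cons (c : Char) (cs : List Char) :
    gtI (c :: cs) = (if c = '>' then 1 else 0) + gtI cs := by
  simp only [gtI, List.countP_cons]
  by_cases h : c = '>' <;> simp [h] <;> try omega

theorem gtI_append_singleton (l : List Char) (c : Char) :
    gtI (l ++ [c]) = gtI l + (if c = '>' then 1 else 0) := by
  simp only [gtI, List.countP_append, List.countP_cons, List.countP_nil]
  by_cases h : c = '>' <;> simp [h] <;> try omega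

theorem inner_lt (l : List Char) (a : Int) :
    l.foldl (fun r i => if i = '<' then r + 1 else r) a = a + ltI l := by
  induction l generalizing a with
  | nil => simp [ltI]
  | cons c cs ih =>
    simp only [List.foldl_cons, ih, ltI_cons]
    split_ifs <;> ring

theorem inner_gt (l : List Char) (a : Int) :
    l.foldl (fun r i => if i = '>' then r + 1 else r) a = a + gtI l := by
  induction l generalizing a with
  | nil => simp [gtI]
  | cons c cs ih =>
    simp only [List.foldl_cons, ih, gtI_cons]
    split_ifs <;> ring

-- the additive fold decomposes into two map-sums
theorem fold_pair (full : List Char) (l : List (Int × Char)) (a b : Int) :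
    l.foldl
      (fun (cg : Int × Int) (p : Int × Char) =>
        let right : Int :=
          if p.2 = '>' then
            (PySem.List.slice full (some p.1) none).foldl
              (fun r i => if i = '<' then r + 1 else r) 0
          else 0
        let left : Int :=
          if p.2 = '<' then
            (PySem.List.slice full none (some p.1)).foldl
              (fun l i => if i = '>' then l + 1 else l) 0
          else 0
        (cg.1 + right, cg.2 + left)) (a, b)
    = (a + (l.map (fun p => if p.2 = '>' then ltI (PySem.List.slice full (some p.1) none) else 0)).sum,
       b + (l.map (fun p => if p.2 = '<' then gtI (PySem.List.slice full none (some p.1)) else 0)).sum) := by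
  induction l generalizing a b with
  | nil => simp
  | cons p ps ih =>
    simp only [List.foldl_cons, List.map_cons, List.sum_cons, ih, Prod.mk.injEq]
    constructor <;>
    · split_ifs <;> simp [inner_lt, inner_gt] <;> try ring

theorem comes_sum (cs : List Char) : ∀ (n : Nat) (full : List Char), full.drop n = cs →
    ((PySem.List.enumerate cs (n : Int)).map
      (fun p => if p.2 = '>' then ltI (PySem.List.slice full (some p.1) none) else 0)).sum
    = pairsF cs := by
  induction cs with
  | nil => intro n full h; simp [PySem.List.enumerate_nil, pairsF]
  | cons c cs ih =>
    intro n full h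
    rw [PySem.List.enumerate_cons]
    simp only [List.map_cons, List.sum_cons]
    have h1 : (n : Int) + 1 = ((n + 1 : Nat) : Int) := by push_cast; ring
    have h2 : full.drop (n + 1) = cs := by
      have hd : (full.drop n).drop 1 = full.drop (n + 1) := by rw [List.drop_drop]
      rw [← hd, h]; simp
    rw [h1, ih (n + 1) full h2]
    rw [PySem.List.slice_from_natCast, h]
    show (if c = '>' then ltI (c :: cs) else 0) + pairsF cs = pairsF (c :: cs)
    have he : (if c = '>' then ltI (c :: cs) else 0) = (if c = '>' then ltI cs else 0) := by
      split_ifs with hc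
      · rw [ltI_cons]; simp [hc]
      · rfl
    rw [he]; rfl

theorem goes_sum (cs : List Char) : ∀ (n : Nat) (full : List Char), full.drop n = cs →
    ((PySem.List.enumerate cs (n : Int)).map
      (fun p => if p.2 = '<' then gtI (PySem.List.slice full none (some p.1)) else 0)).sum
    = goesF (gtI (full.take n)) cs := by
  induction cs with
  | nil => intro n full h; simp [PySem.List.enumerate_nil, goesF]
  | cons c cs ih =>
    intro n full h
    rw [PySem.List.enumerate_cons]
    simp only [List.map_cons, List.sum_cons]
    have h1 : (n : Int) + 1 = ((n + 1 : Nat) : Int) := by push_cast; ring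
    have h2 : full.drop (n + 1) = cs := by
      have hd : (full.drop n).drop 1 = full.drop (n + 1) := by rw [List.drop_drop]
      rw [← hd, h]; simp
    have hget : full[n]? = some c := by
      have h0 : (full.drop n)[0]? = full[n + 0]? := List.getElem?_drop
      rw [h] at h0
      simpa using h0.symm
    have htake : full.take (n + 1) = full.take n ++ [c] := by
      rw [List.take_add_one, hget]; rfl
    rw [h1, ih (n + 1) full h2, PySem.List.slice_to_natCast, htake, gtI_append_singleton]
    simp [goesF]

theorem goesF_shift (cs : List Char) : ∀ (g : Int), goesF g cs = g * ltI cs + goesF 0 cs := by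
  induction cs with
  | nil => intro g; simp [goesF, ltI]
  | cons c cs ih =>
    intro g
    simp only [goesF, ltI_cons]
    rw [ih (g + (if c = '>' then 1 else 0)), ih (0 + (if c = '>' then 1 else 0))]
    split_ifs <;> ring

theorem pairs_eq_goes (cs : List Char) : pairsF cs = goesF 0 cs := by
  induction cs with
  | nil => simp [pairsF, goesF]
  | cons c cs ih =>
    simp only [pairsF, goesF, ih]
    rw [goesF_shift cs (0 + (if c = '>' then 1 else 0))]
    split_ifs <;> ring

theorem b_fold (cs : List Char) : ∀ (g t : Int),
    (cs.foldl
      (fun (st : Int × Int) c =>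
        if c = '>' then (st.1 + 1, st.2)
        else if c = '<' then (st.1, st.2 + 2 * st.1)
        else st) (g, t)).2 = t + 2 * goesF g cs := by
  induction cs with
  | nil => intro g t; simp [goesF]
  | cons c cs ih =>
    intro g t
    simp only [List.foldl_cons, goesF]
    split_ifs with h1 h2
    · rw [h2] at h1; exact absurd h1 (by decide)
    · rw [ih]; simp
    · rw [ih, add_zero]; ring
    · rw [ih, add_zero]; ring

-- ===== VERDICT (by name: the statement is the Claim_ definition above) =====
theorem solution_spec : Claim_equal_solution := by
  intro s _
  show solution s = solution_alt s
  have hc := comes_sum s.toList 0 s.toList (by simp)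
  have hg := goes_sum s.toList 0 s.toList (by simp)
  simp only [Nat.cast_zero, List.take_zero] at hc hg
  have hb := b_fold s.toList 0 0
  have hg0 : gtI [] = 0 := by simp [gtI]
  rw [hg0] at hg
  unfold solution solution_alt
  simp only [fold_pair, hc, hg, hb]
  rw [pairs_eq_goes]
  ring
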